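-- pv_equiv track=rewrite | github.com/JonathanSeriesX/everycase | scripts/batch_cropper.py | filter_database
-- ===== SOURCE A (Python) =====
-- from typing import Dict, Iterable, List, Sequence, Set
--
-- COLUMN_SEPARATOR = ";"  # separates clauses inside `match`
--
-- def filter_database(rows: Sequence[Dict[str, str]], expr: str) -> List[Dict[str, str]]:
--     if not expr:
--         return []
--     clauses = [
--         clause.strip() for clause in expr.split(COLUMN_SEPARATOR) if clause.strip()
--     ]
--     if not clauses:
--         return []
--     matched = list(rows)
--     for clause in clauses:
--         if "~" in clause:
--             key, value = clause.split("~", 1)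
--             key = key.strip().lower()
--             needle = value.strip().lower()
--             matched = [row for row in matched if needle in row.get(key, "").lower()]
--         elif "=" in clause:
--             key, value = clause.split("=", 1)
--             key = key.strip().lower()
--             target = value.strip()
--             matched = [row for row in matched if row.get(key, "") == target]
--         else:
--             raise ValueError(
--                 f"Unsupported clause '{clause}' in expression '{expr}'. "
--                 f"Use '~' for contains or '=' for exact matches."
--             )
--     return matched
-- ===== SOURCE B (Python) =====
-- COLUMN_SEPARATOR = ";"  # separates clauses inside `match`
--
--
-- def _parse(clause):
--     """Compile one stripped clause into (contains?, key, value), or None if unsupported."""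
--     i = clause.find("~")
--     if i >= 0:
--         return (True, clause[:i].strip().lower(), clause[i + 1:].strip().lower())
--     i = clause.find("=")
--     if i >= 0:
--         return (False, clause[:i].strip().lower(), clause[i + 1:].strip())
--     return None
--
--
-- def _parse_all(pieces, expr):
--     """Recursively compile the raw split pieces, skipping blank ones."""
--     if not pieces:
--         return []
--     head = pieces[0].strip()
--     if not head:
--         return _parse_all(pieces[1:], expr)
--     parsed = _parse(head)
--     if parsed is None:
--         raise ValueError(
--             f"Unsupported clause '{head}' in expression '{expr}'. "
--             f"Use '~' for contains or '=' for exact matches."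
--         )
--     return [parsed] + _parse_all(pieces[1:], expr)
--
--
-- def _holds(row, parsed):
--     contains, key, value = parsed
--     field = row.get(key, "")
--     if contains:
--         return value in field.lower()
--     return field == value
--
--
-- def filter_database(rows, expr):
--     program = _parse_all(expr.split(COLUMN_SEPARATOR), expr)
--     if not program:
--         return []
--     return [row for row in rows if all(_holds(row, p) for p in program)]
-- ===== Notes on version B (the rewrite author's own statement) =====
-- stated objective: alternative
-- what changed: B compiles each clause once into an (op, key, value) triple by locating the operator with str.find and slicing (recursing over the raw split pieces), then filters the rows in a single pass over that compiled program, instead of A's per-clause splitMax parsing and one full filtering pass over the surviving rows per clause.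
import Mathlib
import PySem

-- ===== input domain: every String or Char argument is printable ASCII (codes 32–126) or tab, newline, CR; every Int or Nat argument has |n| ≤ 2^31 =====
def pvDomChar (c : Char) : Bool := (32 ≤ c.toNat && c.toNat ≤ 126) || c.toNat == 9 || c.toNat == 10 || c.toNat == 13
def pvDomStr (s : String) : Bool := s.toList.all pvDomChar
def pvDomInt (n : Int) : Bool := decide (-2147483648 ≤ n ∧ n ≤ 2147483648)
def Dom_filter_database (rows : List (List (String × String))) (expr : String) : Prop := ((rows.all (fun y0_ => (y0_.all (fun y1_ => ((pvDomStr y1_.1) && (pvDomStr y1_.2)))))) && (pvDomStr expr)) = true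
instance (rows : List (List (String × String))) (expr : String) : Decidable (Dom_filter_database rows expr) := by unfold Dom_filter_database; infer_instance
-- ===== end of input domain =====

-- B compiles each clause ONCE into an (op, key, value) triple — locating the operator with
-- str.find and slicing, recursively over the raw split pieces — and then filters the rows in a
-- single pass, instead of A's repeated splitMax parsing and one full filtering pass per clause.

-- ===== PORT A =====
-- clause list of `expr`: `[clause.strip() for clause in expr.split(";") if clause.strip()]`
def pvClauses (expr : String) : List String :=
  (((PySem.Str.split? expr ";").getD []).map (fun c => PySem.Str.strip c)).filter (fun c => c ≠ "")

-- loop body of A's `for clause in clauses` (the unsupported-clause branch raises ValueError in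
-- Python; excluded by Pre_, the port leaves `matched` unchanged there)
def pvStepA (matched : List (List (String × String))) (clause : String) :
    List (List (String × String)) :=
  if PySem.Str.isIn "~" clause then
    let parts := (PySem.Str.splitMax? clause "~" 1).getD []
    let key := PySem.Str.lower (PySem.Str.strip (parts.getD 0 ""))
    let needle := PySem.Str.lower (PySem.Str.strip (parts.getD 1 ""))
    matched.filter (fun row =>
      PySem.Str.isIn needle (PySem.Str.lower ((PySem.Dict.mk row).getD key "")))
  else if PySem.Str.isIn "=" clause then
    let parts := (PySem.Str.splitMax? clause "=" 1).getD []
    let key := PySem.Str.lower (PySem.Str.strip (parts.getD 0 ""))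
    let target := PySem.Str.strip (parts.getD 1 "")
    matched.filter (fun row => (PySem.Dict.mk row).getD key "" == target)
  else matched

def filter_database (rows : List (List (String × String))) (expr : String) :
    List (List (String × String)) :=
  if expr = "" then []
  else
    let clauses := pvClauses expr
    if clauses = [] then []
    else clauses.foldl pvStepA rows

-- ===== PORT B =====
-- `_parse`: locate the operator with `clause.find`, slice key/value out; none = unsupported
def pvParse? (clause : String) : Option (Bool × String × String) :=
  let i := PySem.Str.find clause "~"
  if 0 ≤ i then
    some (true, PySem.Str.lower (PySem.Str.strip (PySem.Str.slice clause none (some i))),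
      PySem.Str.lower (PySem.Str.strip (PySem.Str.slice clause (some (i + 1)) none)))
  else
    let j := PySem.Str.find clause "="
    if 0 ≤ j then
      some (false, PySem.Str.lower (PySem.Str.strip (PySem.Str.slice clause none (some j))),
        PySem.Str.strip (PySem.Str.slice clause (some (j + 1)) none))
    else none

-- `_parse_all`: recurse over the raw pieces of expr.split(";"), skipping blank ones;
-- none = the ValueError Python B raises on an unsupported clause (excluded by Pre_)
def pvParseAll? : List String → Option (List (Bool × String × String))
  | [] => some []
  | piece :: rest =>
    let head := PySem.Str.strip piece
    if head = "" then pvParseAll? rest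
    else
      match pvParse? head, pvParseAll? rest with
      | some p, some ps => some (p :: ps)
      | _, _ => none

-- `_holds`: evaluate one compiled triple against a row
def pvHolds (row : List (String × String)) : Bool × String × String → Bool
  | (true, key, value) =>
    PySem.Str.isIn value (PySem.Str.lower ((PySem.Dict.mk row).getD key ""))
  | (false, key, value) => (PySem.Dict.mk row).getD key "" == value

def filter_database_alt (rows : List (List (String × String))) (expr : String) :
    List (List (String × String)) :=
  match pvParseAll? ((PySem.Str.split? expr ";").getD []) with
  | some (p :: ps) => rows.filter (fun row => (p :: ps).all (fun q => pvHolds row q))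
  | _ => []

-- ===== PRECONDITION & SPEC =====
-- Pre_ excludes exactly the expressions with a clause containing neither '~' nor '=',
-- on which Python A (and Python B) raise ValueError.
def Pre_filter_database (rows : List (List (String × String))) (expr : String) : Prop :=
  ∀ c ∈ pvClauses expr, (PySem.Str.isIn "~" c || PySem.Str.isIn "=" c) = true

instance (rows : List (List (String × String))) (expr : String) :
    Decidable (Pre_filter_database rows expr) := by unfold Pre_filter_database; infer_instance

def pvWitness_filter_database : (List (List (String × String))) × String :=
  ([[("name", "Hello")], [("name", "x")]], "name ~ ell; name=Hello")

def Spec_filter_database (rows : List (List (String × String))) (expr : String) (out : List (List (String × String))) : Prop := out = filter_database_alt rows expr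
instance (rows : List (List (String × String))) (expr : String) (out : List (List (String × String))) : Decidable (Spec_filter_database rows expr out) := by unfold Spec_filter_database; infer_instance

-- ===== CLAIM (what is proved, stated in full; the proofs are below) =====
def Claim_equal_filter_database : Prop := ∀ (rows : List (List (String × String))) (expr : String), Dom_filter_database rows expr → Pre_filter_database rows expr → Spec_filter_database rows expr (filter_database rows expr)

-- ===== LEMMAS AND PROOFS =====

-- `split(sep, maxsplit=0)` leaves the rest of the string as one piece
theorem pv_go_zero (sep : List Char) (l : List Char) (fuel : Nat) (cur : List Char)
    (acc : List (List Char)) :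
    PySem.Chars.splitOnMax.go sep fuel 0 l cur acc = ((cur.reverse ++ l) :: acc).reverse := by
  match fuel with
  | 0 => simp [PySem.Chars.splitOnMax.go]
  | fuel+1 => cases l <;> simp [PySem.Chars.splitOnMax.go]

theorem pv_go_yes (sep : List Char) (hsep : sep ≠ []) :
    ∀ (j : Nat) (l : List Char) (fuel : Nat) (cur : List Char) (acc : List (List Char)),
      l.length < fuel → sep <+: l.drop j → (∀ i < j, ¬ sep <+: l.drop i) →
      PySem.Chars.splitOnMax.go sep fuel 1 l cur acc =
        acc.reverse ++ [cur.reverse ++ l.take j, l.drop (j + sep.length)] := by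
  intro j
  induction j with
  | zero =>
    intro l fuel cur acc hf hj _
    match l, fuel, hf with
    | [], _, _ =>
      exact absurd (List.prefix_nil.mp (by simpa using hj)) hsep
    | c :: rest, fuel+1, hf =>
      have hp : sep.isPrefixOf (c :: rest) = true :=
        List.isPrefixOf_iff_prefix.mpr (by simpa using hj)
      rw [show PySem.Chars.splitOnMax.go sep (fuel+1) 1 (c :: rest) cur acc
            = PySem.Chars.splitOnMax.go sep fuel 0 ((c :: rest).drop sep.length) []
                (cur.reverse :: acc) from by
            simp [PySem.Chars.splitOnMax.go, hp]]
      rw [pv_go_zero]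
      simp
  | succ j ih =>
    intro l fuel cur acc hf hj hmin
    match l, fuel, hf with
    | [], _, _ =>
      exact absurd (List.prefix_nil.mp (by simpa using hj)) hsep
    | c :: rest, fuel+1, hf =>
      have hp : sep.isPrefixOf (c :: rest) = false := by
        rw [Bool.eq_false_iff]
        intro hx
        exact hmin 0 (Nat.succ_pos _) (by simpa using List.isPrefixOf_iff_prefix.mp hx)
      rw [show PySem.Chars.splitOnMax.go sep (fuel+1) 1 (c :: rest) cur acc
            = PySem.Chars.splitOnMax.go sep fuel 1 rest (c :: cur) acc from by
            simp [PySem.Chars.splitOnMax.go, hp]]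
      rw [ih rest fuel (c :: cur) acc (by simpa using hf) (by simpa using hj)
            (fun i hi => by simpa using hmin (i+1) (by omega))]
      have : j + 1 + sep.length = (j + sep.length) + 1 := by omega
      simp [this]

-- split(sep, 1) described by find: the piece before the first occurrence and the rest
theorem pv_split1_yes (sep l : List Char) (hsep : sep ≠ [])
    (h : PySem.Chars.isIn sep l = true) :
    PySem.Chars.splitOnMax l sep 1 =
      [l.take (PySem.Chars.find l sep).toNat,
       l.drop ((PySem.Chars.find l sep).toNat + sep.length)] := by
  have hnn : 0 ≤ PySem.Chars.find l sep :=
    (PySem.Chars.find_nonneg_iff l sep).mpr ((PySem.Chars.isIn_iff_infix sep l).mp h)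
  obtain ⟨hpre, hmin⟩ := PySem.Chars.find_spec hnn
  unfold PySem.Chars.splitOnMax
  rw [if_neg (by omega), show Int.toNat 1 = 1 from rfl]
  rw [pv_go_yes sep hsep (PySem.Chars.find l sep).toNat l (l.length + 1) [] []
        (by omega) hpre hmin]
  simp

-- the parts A's split produces, phrased through B's find and slices
theorem pv_parts_eq (c sep : String) (hsep : sep.toList.length = 1)
    (h : PySem.Str.isIn sep c = true) :
    (PySem.Str.splitMax? c sep 1).getD [] =
      [PySem.Str.slice c none (some (PySem.Str.find c sep)),
       PySem.Str.slice c (some (PySem.Str.find c sep + 1)) none] := by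
  have hs : ¬ sep.toList.isEmpty = true := by
    cases hl : sep.toList with
    | nil => simp [hl] at hsep
    | cons a t => simp
  have hnn : 0 ≤ PySem.Chars.find c.toList sep.toList := by
    rw [PySem.Chars.find_nonneg_iff]
    rw [PySem.Str.isIn_eq] at h
    exact (PySem.Chars.isIn_iff_infix _ _).mp h
  have hsplit := pv_split1_yes sep.toList c.toList (by intro hx; simp [hx] at hsep)
      (by rw [PySem.Str.isIn_eq] at h; exact h)
  unfold PySem.Str.splitMax? PySem.Chars.splitMax?
  rw [if_neg hs, hsplit, hsep]
  apply List.ext_getElem (by simp)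
  intro n h1 h2
  match n, h2 with
  | 0, _ =>
    simp only [List.getElem_cons_zero]
    rw [String.toList_inj.symm]
    rw [PySem.Str.toList_slice, PySem.Chars.slice_eq_listSlice, PySem.Str.find_eq,
      PySem.List.slice_to c.toList hnn]
    simp
  | 1, _ =>
    simp only [List.getElem_cons_succ, List.getElem_cons_zero]
    rw [String.toList_inj.symm]
    have h1 : (PySem.Chars.find c.toList sep.toList + 1).toNat
        = (PySem.Chars.find c.toList sep.toList).toNat + 1 := by omega
    rw [PySem.Str.toList_slice, PySem.Chars.slice_eq_listSlice, PySem.Str.find_eq,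
      PySem.List.slice_from c.toList (by omega), h1]
    simp

-- a supported clause compiles, and A's filtering step for it is one filter by pvHolds
theorem pvParse_sound (c : String)
    (h : (PySem.Str.isIn "~" c || PySem.Str.isIn "=" c) = true) :
    ∃ p, pvParse? c = some p ∧
      ∀ matched : List (List (String × String)),
        pvStepA matched c = matched.filter (fun row => pvHolds row p) := by
  by_cases h1 : PySem.Str.isIn "~" c = true
  · have hi : 0 ≤ PySem.Str.find c "~" := by
      rw [PySem.Str.find_eq, PySem.Chars.find_nonneg_iff]
      rw [PySem.Str.isIn_eq, PySem.Chars.isIn_iff_infix] at h1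
      exact h1
    refine ⟨(true,
        PySem.Str.lower (PySem.Str.strip (PySem.Str.slice c none (some (PySem.Str.find c "~")))),
        PySem.Str.lower (PySem.Str.strip
          (PySem.Str.slice c (some (PySem.Str.find c "~" + 1)) none))), ?_, ?_⟩
    · simp only [pvParse?]
      rw [if_pos hi]
    · intro matched
      unfold pvStepA
      rw [if_pos h1, pv_parts_eq c "~" rfl h1]
      simp [pvHolds]
  · have h1f : PySem.Str.isIn "~" c = false := Bool.eq_false_iff.mpr h1
    have h2 : PySem.Str.isIn "=" c = true := by
      rcases Bool.or_eq_true_iff.mp h with h' | h'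
      · exact absurd h' h1
      · exact h'
    have hi : ¬ 0 ≤ PySem.Str.find c "~" := by
      have hfind : PySem.Chars.find c.toList "~".toList = -1 := by
        rw [PySem.Chars.find_eq_neg_one_iff]
        intro hx
        have hin : PySem.Chars.isIn "~".toList c.toList = true :=
          (PySem.Chars.isIn_iff_infix _ _).mpr hx
        rw [← PySem.Str.isIn_eq, h1f] at hin
        exact Bool.false_ne_true hin
      rw [PySem.Str.find_eq, hfind]
      omega
    have hj : 0 ≤ PySem.Str.find c "=" := by
      rw [PySem.Str.find_eq, PySem.Chars.find_nonneg_iff]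
      rw [PySem.Str.isIn_eq, PySem.Chars.isIn_iff_infix] at h2
      exact h2
    refine ⟨(false,
        PySem.Str.lower (PySem.Str.strip (PySem.Str.slice c none (some (PySem.Str.find c "=")))),
        PySem.Str.strip (PySem.Str.slice c (some (PySem.Str.find c "=" + 1)) none)), ?_, ?_⟩
    · simp only [pvParse?]
      rw [if_neg hi, if_pos hj]
    · intro matched
      unfold pvStepA
      rw [if_neg h1, if_pos h2, pv_parts_eq c "=" rfl h2]
      simp [pvHolds]

-- proof-only helper: B's compilation restricted to an already-stripped clause list
def pvCompile : List String → Option (List (Bool × String × String))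
  | [] => some []
  | c :: cs =>
    match pvParse? c, pvCompile cs with
    | some p, some ps => some (p :: ps)
    | _, _ => none

theorem pvParseAll_eq_compile (cs : List String) :
    pvParseAll? cs
      = pvCompile ((cs.map (fun c => PySem.Str.strip c)).filter (fun c => c ≠ "")) := by
  induction cs with
  | nil => rfl
  | cons c cs ih =>
    by_cases hc : PySem.Str.strip c = ""
    · simp [pvParseAll?, hc, ih]
    · simp [pvParseAll?, pvCompile, hc, ih]

-- A's sequence of filtering passes = one filter by the conjunction of the compiled triples
theorem pvCompile_foldl (ds : List String)
    (h : ∀ c ∈ ds, (PySem.Str.isIn "~" c || PySem.Str.isIn "=" c) = true) :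
    ∃ ps, pvCompile ds = some ps ∧ ps.length = ds.length ∧
      ∀ rows : List (List (String × String)),
        ds.foldl pvStepA rows = rows.filter (fun row => ps.all (fun q => pvHolds row q)) := by
  induction ds with
  | nil => exact ⟨[], rfl, rfl, by simp⟩
  | cons d ds ih =>
    obtain ⟨p, hp, hstep⟩ := pvParse_sound d (h d (by simp))
    obtain ⟨ps, hps, hlen, hfold⟩ := ih (fun c hc => h c (by simp [hc]))
    refine ⟨p :: ps, ?_, by simp [hlen], ?_⟩
    · simp [pvCompile, hp, hps]
    · intro rows
      rw [List.foldl_cons, hstep rows, hfold, List.filter_filter]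
      apply List.filter_congr
      intro row _
      simp [Bool.and_comm]

-- ===== VERDICT (by name: the statement is the Claim_ definition above) =====
theorem filter_database_spec : Claim_equal_filter_database := by
  intro rows expr _ hpre
  unfold Spec_filter_database filter_database filter_database_alt
  rw [pvParseAll_eq_compile]
  by_cases he : expr = ""
  · subst he
    rfl
  · rw [if_neg he]
    show (if pvClauses expr = [] then []
        else (pvClauses expr).foldl pvStepA rows) = _
    rw [show ((((PySem.Str.split? expr ";").getD []).map
          (fun c => PySem.Str.strip c)).filter (fun c => c ≠ "")) = pvClauses expr from rfl]
    obtain ⟨ps, hps, hlen, hfold⟩ := pvCompile_foldl (pvClauses expr) hpre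
    rw [hps]
    by_cases hd : pvClauses expr = []
    · rw [if_pos hd]
      rw [hd] at hlen
      simp at hlen
      subst hlen
      rfl
    · rw [if_neg hd, hfold rows]
      cases ps with
      | nil =>
        exfalso
        simp at hlen
        exact hd (List.eq_nil_of_length_eq_zero hlen.symm)
      | cons p ps' => rfl
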